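-- pv_equiv track=rewrite | github.com/FangYijia/deg-VC | vcdegequal.py | calculate_f2_degree
-- ===== SOURCE A (Python) =====
-- def popcount(n: int) -> int:
--     """Calculates the population count (Hamming weight) of an integer."""
--     return bin(n).count("1")
--
-- def calculate_f2_degree(truth_table: list[int], n: int) -> int:
--     """
--     Calculates the F2-degree of a boolean function using its truth table.
--
--     This is done by converting the function to its Algebraic Normal Form (ANF)
--     using a Fast Walsh-Hadamard Transform. The degree is the size of the
--     largest monomial in the ANF, which corresponds to the maximum popcount
--     of an index with a non-zero coefficient.
--
--     Args:
--         truth_table: A list of 2^n integers (0 or 1) representing the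
--                      function's output for inputs 0 to 2^n - 1.
--         n: The number of boolean variables.
--
--     Returns:
--         The F2-degree of the function.
--     """
--     if not any(truth_table):  # Handle constant zero function
--         return 0
--
--     # The coefficients of the ANF are calculated via a transform on the truth table
--     coeffs = list(truth_table)
--     for i in range(n):
--         for j in range(len(coeffs)):
--             # Apply the transform based on the subset property
--             if (j >> i) & 1:
--                 coeffs[j] ^= coeffs[j ^ (1 << i)]
--
--     max_deg = 0
--     for i, coeff in enumerate(coeffs):
--         if coeff == 1:
--             # The degree of the monomial corresponding to this coefficient
--             # is the number of variables in it (popcount of the index).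
--             max_deg = max(max_deg, popcount(i))
--
--     return max_deg
-- ===== SOURCE B (Python) =====
-- def calculate_f2_degree(truth_table, n):
--     """Recursive Moebius/ANF: coefficient of index i computed top-down per index,
--     no in-place butterfly array; then max popcount over indices with coefficient 1."""
--     L = len(truth_table)
--     # variables beyond the table's bit length never occur in an index below L
--     nb = min(n, L.bit_length()) if n > 0 else 0
--
--     def coeff(k, i):
--         if k == 0:
--             return truth_table[i]
--         b = 1 << (k - 1)
--         c = coeff(k - 1, i)
--         if i & b:
--             c ^= coeff(k - 1, i ^ b)
--         return c
--
--     best = 0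
--     for i in range(L):
--         if coeff(nb, i) == 1:
--             best = max(best, bin(i).count("1"))
--     return best
-- ===== Notes on version B (the rewrite author's own statement) =====
-- stated objective: alternative
-- what changed: A converts the truth table to ANF with an in-place iterative butterfly transform (n passes over the whole array); B computes each ANF coefficient independently by a top-down recursion on the number of variables (depth capped by the table's bit length) and takes the running max popcount directly, with no mutable coefficient array and no constant-zero guard.
import Mathlib
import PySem

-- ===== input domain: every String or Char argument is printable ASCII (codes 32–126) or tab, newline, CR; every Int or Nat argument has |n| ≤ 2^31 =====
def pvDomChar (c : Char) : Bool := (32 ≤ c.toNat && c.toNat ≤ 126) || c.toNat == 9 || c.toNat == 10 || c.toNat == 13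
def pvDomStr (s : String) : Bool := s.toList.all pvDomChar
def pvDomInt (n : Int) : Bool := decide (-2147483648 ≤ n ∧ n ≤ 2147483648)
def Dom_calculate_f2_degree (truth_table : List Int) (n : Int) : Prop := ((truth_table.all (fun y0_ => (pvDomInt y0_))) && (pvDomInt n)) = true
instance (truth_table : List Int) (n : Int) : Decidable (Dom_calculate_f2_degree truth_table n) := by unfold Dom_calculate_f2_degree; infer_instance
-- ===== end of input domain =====

-- B replaces A's in-place butterfly ANF transform by a per-index top-down recursion on the
-- number of variables, computing each ANF coefficient independently (alternative decomposition, not faster).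


-- ===== PORT A =====
-- bin(m).count("1"): PySem.Int.bitCount is exact (it reads |m|; the '-'/'0b' prefix contains no '1')
def popcount (m : Int) : Int := (PySem.Int.bitCount m : Int)

-- the body of A's inner loop: 'if (j >> i) & 1: coeffs[j] ^= coeffs[j ^ (1 << i)]'
-- (named so the proofs can refer to it; i from range(n) is nonnegative, so i.toNat is exact)
def pvStep (i : Int) (cs' : List Int) (j : Int) : List Int :=
  if PySem.Int.band (j >>> i.toNat) 1 = 1 then
    PySem.List.pySetD cs' j (PySem.Int.bxor (PySem.List.pyGetD cs' j 0)
      (PySem.List.pyGetD cs' (PySem.Int.bxor j ((1 : Int) <<< i.toNat)) 0))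
  else cs'

def calculate_f2_degree (truth_table : List Int) (n : Int) : Int :=
  if !(truth_table.any (fun x => decide (x ≠ 0))) then 0  -- if not any(truth_table): return 0
  else
    -- coeffs = list(truth_table); for i in range(n): for j in range(len(coeffs)): pvStep
    let coeffs :=
      (PySem.List.pyRange 0 n 1).foldl (fun cs i =>
        (PySem.List.pyRange 0 (PySem.List.len cs) 1).foldl (pvStep i) cs) truth_table
    -- for i, coeff in enumerate(coeffs): …   (enumerate(xs) = zip(range(len(xs)), xs))
    ((PySem.List.pyRange 0 (PySem.List.len coeffs) 1).zip coeffs).foldl (fun md p =>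
      if p.2 = 1 then max md (popcount p.1) else md) 0

-- ===== PORT B =====
-- coeff(k, i) from Source B: recursive ANF coefficient over the first k variables
def pvCoeff (truth_table : List Int) (k : Nat) (i : Nat) : Int :=
  match k with
  | 0 => PySem.List.pyGetD truth_table (i : Int) 0   -- truth_table[i]; i < len holds at every call
  | Nat.succ k =>
    let b := 1 <<< k
    let c := pvCoeff truth_table k i
    if i &&& b ≠ 0 then PySem.Int.bxor c (pvCoeff truth_table k (i ^^^ b)) else c

def calculate_f2_degree_alt (truth_table : List Int) (n : Int) : Int :=
  let L := truth_table.length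
  -- nb = min(n, L.bit_length()) if n > 0 else 0
  let nb : Nat := if 0 < n then min n.toNat (PySem.Int.bitLength (L : Int)) else 0
  (PySem.List.pyRange 0 (L : Int) 1).foldl (fun best i =>
    if pvCoeff truth_table nb i.toNat = 1 then max best ((PySem.Int.bitCount i : Int))  -- bin(i).count("1")
    else best) 0

-- ===== PRECONDITION & SPEC =====
def Spec_calculate_f2_degree (truth_table : List Int) (n : Int) (out : Int) : Prop := out = calculate_f2_degree_alt truth_table n
instance (truth_table : List Int) (n : Int) (out : Int) : Decidable (Spec_calculate_f2_degree truth_table n out) := by unfold Spec_calculate_f2_degree; infer_instance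

-- ===== CLAIM (what is proved, stated in full; the proofs are below) =====
def Claim_equal_calculate_f2_degree : Prop := ∀ (truth_table : List Int) (n : Int), Dom_calculate_f2_degree truth_table n → Spec_calculate_f2_degree truth_table n (calculate_f2_degree truth_table n)

-- ===== LEMMAS AND PROOFS =====

-- pvStep with a Nat bit position (the form the pass lemmas use)
def pvStepN (k : Nat) (cs' : List Int) (j : Int) : List Int :=
  if PySem.Int.band (j >>> k) 1 = 1 then
    PySem.List.pySetD cs' j (PySem.Int.bxor (PySem.List.pyGetD cs' j 0)
      (PySem.List.pyGetD cs' (PySem.Int.bxor j ((1 : Int) <<< k)) 0))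
  else cs'

lemma pv_band_one (t k : Nat) : (PySem.Int.band ((t : Int) >>> k) 1 = 1) ↔ t.testBit k := by
  rw [show PySem.Int.band ((t : Int) >>> k) 1 = (((t >>> k) &&& 1 : Nat) : Int) by
        rw [← Int.natCast_shiftRight]; exact_mod_cast PySem.Int.band_natCast (t >>> k) 1,
      show ((t >>> k) &&& 1 : Nat) = (if Nat.testBit t k then 1 else 0) by
        rw [Nat.and_one_is_mod]
        rcases h : Nat.testBit t k <;> simp [Nat.testBit] at h ⊢ <;> omega]
  by_cases h : t.testBit k <;> simp [h]

lemma pv_bxor_cast (t k : Nat) :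
    PySem.Int.bxor (t : Int) ((1 : Int) <<< k) = ((t ^^^ (1 <<< k) : Nat) : Int) := by
  rw [show ((1 : Int) <<< k) = (((1 <<< k : Nat)) : Int) from by
        exact_mod_cast (Int.natCast_shiftLeft 1 k).symm]
  exact PySem.Int.bxor_natCast t (1 <<< k)

lemma pv_xor_lt (t k : Nat) (h : t.testBit k) : (t ^^^ (1 <<< k)) < t := by
  rw [Nat.one_shiftLeft]
  apply Nat.lt_of_testBit k
  · simp [Nat.testBit_xor, h, Nat.testBit_two_pow_self]
  · exact h
  · intro j hj; simp [Nat.testBit_xor, (Nat.ne_of_gt hj).symm]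

lemma pv_xor_testBit (t k : Nat) : (t ^^^ (1 <<< k)).testBit k = !t.testBit k := by
  simp [Nat.one_shiftLeft, Nat.testBit_xor, Nat.testBit_two_pow_self, Bool.xor_comm]

lemma pv_and_shift (i k : Nat) : (i &&& (1 <<< k) ≠ 0) ↔ i.testBit k := by
  rw [Nat.one_shiftLeft, Nat.and_two_pow]
  rcases h : i.testBit k <;> simp

lemma pv_getD_set (ds : List Int) (t : Nat) (v : Int) (m : Nat) :
    (ds.set t v).getD m 0 = if m = t ∧ t < ds.length then v else ds.getD m 0 := by
  simp only [List.getD_eq_getElem?_getD, List.getElem?_set]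
  rcases eq_or_ne m t with h | h
  · subst h; by_cases ht : m < ds.length <;> simp [ht]
  · simp [h, Ne.symm h]

-- the per-index value of one pass, relative to the list cs at the start of the pass
def pvPassVal (cs : List Int) (k m : Nat) : Int :=
  if m.testBit k then PySem.Int.bxor (cs.getD m 0) (cs.getD (m ^^^ (1 <<< k)) 0) else cs.getD m 0

lemma pv_step_length (l : List Int) (k : Nat) (cs : List Int) :
    (l.foldl (pvStepN k) cs).length = cs.length := by
  induction l generalizing cs with
  | nil => rfl
  | cons x l ih =>
    simp only [List.foldl_cons]
    rw [ih]
    unfold pvStepN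
    split
    · simp [pysem]
    · rfl

-- the sequential inner pass equals the pointwise update: entries with bit k set are
-- rewritten left to right, and every partner read (bit k clear) still sees its original value
lemma pv_pass_go (cs : List Int) (k : Nat) : ∀ (d t : Nat) (ds : List Int),
    cs.length - t = d → ds.length = cs.length →
    (∀ m : Nat, m < cs.length →
      ds.getD m 0 = if m < t ∧ m.testBit k then pvPassVal cs k m else cs.getD m 0) →
    ∀ m : Nat, m < cs.length →
      ((PySem.List.pyRange (t : Int) (cs.length : Int) 1).foldl (pvStepN k) ds).getD m 0
        = pvPassVal cs k m := by
  intro d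
  induction d with
  | zero =>
    intro t ds hd hlen hinv m hm
    rw [PySem.List.pyRange_one_eq_nil (by exact_mod_cast Nat.le_of_sub_eq_zero hd)]
    simp only [List.foldl_nil]
    rw [hinv m hm]
    have hle := Nat.le_of_sub_eq_zero hd
    have hmt : m < t := by omega
    rcases htb : m.testBit k <;> simp [pvPassVal, hmt, htb]
  | succ d ih =>
    intro t ds hd hlen hinv m hm
    have ht : t < cs.length := by omega
    rw [PySem.List.pyRange_one_cons (by exact_mod_cast ht)]
    simp only [List.foldl_cons]
    rw [show ((t : Int) + 1) = ((t + 1 : Nat) : Int) by push_cast; ring]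
    refine ih (t + 1) (pvStepN k ds (t : Int)) (by omega) ?_ ?_ m hm
    · unfold pvStepN; split
      · simp [pysem, hlen]
      · exact hlen
    · intro m' hm'
      unfold pvStepN
      by_cases htb : t.testBit k
      · rw [if_pos ((pv_band_one t k).mpr htb)]
        have hplt : (t ^^^ (1 <<< k)) < t := pv_xor_lt t k htb
        have hpbit : (t ^^^ (1 <<< k)).testBit k = false := by
          rw [pv_xor_testBit, htb]; rfl
        have hds_t : PySem.List.pyGetD ds ((t : Int)) 0 = cs.getD t 0 := by
          rw [PySem.List.pyGetD_natCast, hinv t ht]; simp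
        have hds_p : PySem.List.pyGetD ds (PySem.Int.bxor (t : Int) ((1 : Int) <<< k)) 0
            = cs.getD (t ^^^ (1 <<< k)) 0 := by
          rw [pv_bxor_cast, PySem.List.pyGetD_natCast,
              hinv (t ^^^ (1 <<< k)) (by omega)]
          simp [hpbit]
        rw [hds_t, hds_p, PySem.List.pySetD_natCast, pv_getD_set]
        rcases eq_or_ne m' t with he | he
        · subst he
          rw [if_pos ⟨rfl, by omega⟩, if_pos ⟨by omega, htb⟩]
          simp [pvPassVal, htb]
        · rw [if_neg (by simp [he]), hinv m' hm']
          have : (m' < t + 1 ∧ m'.testBit k) ↔ (m' < t ∧ m'.testBit k) := by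
            constructor <;> rintro ⟨h1, h2⟩ <;> exact ⟨by omega, h2⟩
          rw [if_congr this rfl rfl]
      · rw [if_neg (fun hc => htb ((pv_band_one t k).mp hc)), hinv m' hm']
        rcases eq_or_ne m' t with he | he
        · subst he; simp [htb]
        · have : (m' < t + 1 ∧ m'.testBit k) ↔ (m' < t ∧ m'.testBit k) := by
            constructor <;> rintro ⟨h1, h2⟩ <;> exact ⟨by omega, h2⟩
          rw [if_congr this rfl rfl]

lemma pv_pass_spec (cs : List Int) (k : Nat) (m : Nat) (hm : m < cs.length) :
    ((PySem.List.pyRange 0 (cs.length : Int) 1).foldl (pvStepN k) cs).getD m 0 = pvPassVal cs k m := by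
  have h := pv_pass_go cs k cs.length 0 cs (by omega) rfl (by intro m hm; simp) m hm
  simpa using h

-- the outer fold over passes 0..m-1 computes pvCoeff pointwise
lemma pv_outer_spec (tt : List Int) (m : Nat) :
    ((List.range m).foldl (fun cs k =>
        (PySem.List.pyRange 0 (PySem.List.len cs) 1).foldl (pvStepN k) cs) tt).length = tt.length ∧
    ∀ j : Nat, j < tt.length →
      ((List.range m).foldl (fun cs k =>
        (PySem.List.pyRange 0 (PySem.List.len cs) 1).foldl (pvStepN k) cs) tt).getD j 0
        = pvCoeff tt m j := by
  induction m with
  | zero => exact ⟨rfl, fun j hj => by simp [pvCoeff]⟩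
  | succ m ih =>
    obtain ⟨ihlen, ihval⟩ := ih
    rw [List.range_succ]
    simp only [List.foldl_append, List.foldl_cons, List.foldl_nil]
    set res := (List.range m).foldl (fun cs k =>
        (PySem.List.pyRange 0 (PySem.List.len cs) 1).foldl (pvStepN k) cs) tt with hres
    constructor
    · rw [PySem.List.len_eq, pv_step_length, ihlen]
    · intro j hj
      rw [PySem.List.len_eq, pv_pass_spec res m j (by omega)]
      unfold pvPassVal
      simp only [pvCoeff]
      by_cases htb : j.testBit m
      · have hlt : (j ^^^ (1 <<< m)) < j := pv_xor_lt j m htb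
        rw [if_pos htb, if_pos ((pv_and_shift j m).mpr htb),
            ihval j hj, ihval (j ^^^ (1 <<< m)) (by omega)]
      · rw [if_neg htb, if_neg (fun hc => htb ((pv_and_shift j m).mp hc)), ihval j hj]

-- bit positions at or above the table's bit length never occur in an index below the length
lemma pv_coeff_high (tt : List Int) (j : Nat) (hj : j < tt.length) :
    ∀ d : Nat, pvCoeff tt (PySem.Int.bitLength (tt.length : Int) + d) j
      = pvCoeff tt (PySem.Int.bitLength (tt.length : Int)) j := by
  intro d
  induction d with
  | zero => rfl
  | succ d ih =>
    have hbig : j < 2 ^ (PySem.Int.bitLength (tt.length : Int) + d) := by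
      have h1 := PySem.Int.lt_two_pow_bitLength (tt.length : Int)
      have h2 : (2 : Nat) ^ PySem.Int.bitLength ((tt.length : Nat) : Int)
          ≤ 2 ^ (PySem.Int.bitLength ((tt.length : Nat) : Int) + d) :=
        Nat.pow_le_pow_right (by omega) (by omega)
      simp only [Int.natAbs_natCast] at h1
      omega
    have htb : j.testBit (PySem.Int.bitLength (tt.length : Int) + d) = false :=
      Nat.testBit_lt_two_pow hbig
    show pvCoeff tt (Nat.succ (PySem.Int.bitLength (tt.length : Int) + d)) j = _
    rw [← ih]
    simp only [pvCoeff]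
    rw [if_neg (fun hc => absurd ((pv_and_shift _ _).mp hc) (by simp [htb]))]

lemma pv_coeff_cap (tt : List Int) (m j : Nat) (hj : j < tt.length) :
    pvCoeff tt m j = pvCoeff tt (min m (PySem.Int.bitLength (tt.length : Int))) j := by
  rcases le_total m (PySem.Int.bitLength (tt.length : Int)) with h | h
  · rw [Nat.min_eq_left h]
  · rw [Nat.min_eq_right h,
        show m = PySem.Int.bitLength (tt.length : Int) + (m - PySem.Int.bitLength (tt.length : Int)) by omega,
        pv_coeff_high tt j hj]

-- a constant-zero table has all coefficients 0
lemma pv_coeff_zero (tt : List Int) (h : ∀ x ∈ tt, x = 0) (k i : Nat) :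
    pvCoeff tt k i = 0 := by
  induction k generalizing i with
  | zero =>
    simp only [pvCoeff, PySem.List.pyGetD_natCast]
    rcases hi : tt[i]? with _ | v
    · simp [List.getD_eq_getElem?_getD, hi]
    · simp [List.getD_eq_getElem?_getD, hi, h v (List.mem_of_getElem? hi)]
  | succ k ih =>
    simp only [pvCoeff, ih]
    split <;> simp

-- A's outer loop over range(n) as a fold over Nat bit positions
lemma pv_A_outer (tt : List Int) (n : Int) :
    (PySem.List.pyRange 0 n 1).foldl (fun cs i =>
        (PySem.List.pyRange 0 (PySem.List.len cs) 1).foldl (pvStep i) cs) tt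
    = (List.range n.toNat).foldl (fun cs k =>
        (PySem.List.pyRange 0 (PySem.List.len cs) 1).foldl (pvStepN k) cs) tt := by
  rcases (by omega : n ≤ 0 ∨ 0 < n) with hn | hn
  · rw [PySem.List.pyRange_one_eq_nil hn, Int.toNat_of_nonpos hn]
    rfl
  · rw [PySem.List.pyRange_one, sub_zero, List.foldl_map]
    simp only [zero_add]
    rfl

-- the fold over zip(range(len(res)), res) as a fold over Nat indices
lemma pv_zip_fold {β : Type} (f : β → Int × Int → β) :
    ∀ (res : List Int) (t : Nat) (b : β),
    ((PySem.List.pyRange (t : Int) ((t : Nat) + res.length : Nat) 1).zip res).foldl f b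
      = (List.range res.length).foldl (fun acc j => f acc (((t + j : Nat) : Int), res.getD j 0)) b := by
  intro res
  induction res with
  | nil => intro t b; simp
  | cons x rs ih =>
    intro t b
    rw [PySem.List.pyRange_one_cons (by push_cast [List.length_cons]; omega)]
    simp only [List.zip_cons_cons, List.foldl_cons]
    rw [show ((t : Int) + 1) = ((t + 1 : Nat) : Int) by push_cast; ring,
        show ((t : Nat) + (x :: rs).length : Nat) = ((t + 1) + rs.length : Nat) by
          simp [List.length_cons]; omega]
    rw [ih (t + 1) (f b ((t : Int), x))]
    rw [List.length_cons, List.range_succ_eq_map]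
    simp only [List.foldl_cons, List.foldl_map, List.getD_cons_succ, List.getD_cons_zero,
      Nat.add_zero]
    have h : ∀ j : Nat, t + 1 + j = t + (j + 1) := fun j => by omega
    simp only [h]

lemma pv_zip_fold0 {β : Type} (f : β → Int × Int → β) (res : List Int) (b : β) :
    ((PySem.List.pyRange 0 (res.length : Int) 1).zip res).foldl f b
      = (List.range res.length).foldl (fun acc j => f acc (((j : Nat) : Int), res.getD j 0)) b := by
  have h := pv_zip_fold f res 0 b
  simpa using h

-- B's fold over range(L) as a fold over Nat indices
lemma pv_B_fold (tt : List Int) (nb : Nat) :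
    (PySem.List.pyRange 0 (tt.length : Int) 1).foldl (fun best i =>
      if pvCoeff tt nb i.toNat = 1 then max best ((PySem.Int.bitCount i : Int)) else best) 0
    = (List.range tt.length).foldl (fun best j =>
      if pvCoeff tt nb j = 1 then max best ((PySem.Int.bitCount (j : Int) : Int)) else best) 0 := by
  rw [PySem.List.pyRange_one, sub_zero, Int.toNat_natCast, List.foldl_map]
  simp only [zero_add, Int.toNat_natCast]

-- ===== VERDICT (by name: the statement is the Claim_ definition above) =====
theorem calculate_f2_degree_spec : Claim_equal_calculate_f2_degree := by
  unfold Claim_equal_calculate_f2_degree Spec_calculate_f2_degree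
  intro tt n _
  unfold calculate_f2_degree calculate_f2_degree_alt
  by_cases hany : tt.any (fun x => decide (x ≠ 0))
  · simp only [hany, Bool.not_true, Bool.false_eq_true, if_false]
    rw [pv_A_outer]
    obtain ⟨hlen, hval⟩ := pv_outer_spec tt n.toNat
    set res := (List.range n.toNat).foldl (fun cs k =>
        (PySem.List.pyRange 0 (PySem.List.len cs) 1).foldl (pvStepN k) cs) tt with hres
    have hnb : (if 0 < n then min n.toNat (PySem.Int.bitLength (tt.length : Int)) else 0)
        = min n.toNat (PySem.Int.bitLength (tt.length : Int)) := by
      by_cases h0 : 0 < n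
      · rw [if_pos h0]
      · rw [if_neg h0, Int.toNat_of_nonpos (by omega), Nat.zero_min]
    rw [PySem.List.len_eq, pv_zip_fold0, pv_B_fold, hlen]
    apply PySem.List.foldl_congr_mem
    intro acc j hj
    have hjlt : j < tt.length := List.mem_range.mp hj
    dsimp only
    rw [hval j hjlt, pv_coeff_cap tt n.toNat j hjlt, hnb]
    simp only [popcount]
  · simp only [hany, Bool.not_false, if_true]
    have hz : ∀ x ∈ tt, x = 0 := by
      intro x hx
      by_contra hne
      exact hany (List.any_eq_true.mpr ⟨x, hx, by simpa using hne⟩)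
    rw [pv_B_fold]
    rw [PySem.List.foldl_congr_mem _ _ (fun (best : Int) (j : Nat) => best) 0
          (by intro acc x hx; rw [pv_coeff_zero tt hz]; norm_num),
        PySem.List.foldl_ignore]
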